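-- pv_equiv track=rewrite | github.com/jakhub21/Multimedia-System | Lab6/main.py | help_fun_different
-- ===== SOURCE A (Python) =====
-- def help_fun_different(text):
--     counter = 1
--     for i in range(len(text) - 1):
--         if text[i] == text[i + 1]:
--             counter -= 1
--             break
--         counter += 1
--     return counter
-- ===== SOURCE B (Python) =====
-- def help_fun_different(text):
--     n = len(text)
--     i = 0
--     while i < n:
--         j = i + 1
--         while j < n and text[j] == text[i]:
--             j += 1
--         if j - i >= 2:
--             return i
--         i = j
--     return n
-- ===== Notes on version B (the rewrite author's own statement) =====
-- stated objective: alternative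
-- what changed: B decomposes the text into maximal runs of equal characters (advancing run by run), returning the start offset of the first run of length >= 2 and the full length if there is none, instead of A's single pass comparing each adjacent index pair with a counter.
-- intended difference: On the empty string A returns 1 (its counter starts at 1 and the loop never runs) although zero characters were scanned; B returns 0, the correct count of characters before any adjacent pair. — e.g. on help_fun_different(""): A returns 1, B returns 0
import Mathlib
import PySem

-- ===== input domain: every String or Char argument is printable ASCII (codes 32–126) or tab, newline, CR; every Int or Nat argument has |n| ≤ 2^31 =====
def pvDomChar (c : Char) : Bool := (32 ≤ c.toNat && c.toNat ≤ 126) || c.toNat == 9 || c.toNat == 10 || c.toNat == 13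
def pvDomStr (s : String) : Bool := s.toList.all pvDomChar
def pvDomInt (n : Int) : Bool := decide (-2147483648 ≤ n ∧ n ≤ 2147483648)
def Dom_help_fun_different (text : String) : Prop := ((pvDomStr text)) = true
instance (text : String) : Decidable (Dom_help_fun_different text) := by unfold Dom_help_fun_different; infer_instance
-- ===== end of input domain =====

-- B replaces A's adjacent-pair counter scan with a run-decomposition (alternative structure, same cost);
-- on the empty string A returns 1 (stale counter) while B returns the intended 0 (stated as D_ below).


-- ===== PORT A =====
-- loop over adjacent pairs with a counter; break (= return counter - 1) at the first equal pair
def pvAGo : List Char → Int → Int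
  | c1 :: c2 :: rest, counter =>
      if c1 = c2 then counter - 1
      else pvAGo (c2 :: rest) (counter + 1)
  | _, counter => counter

def help_fun_different (text : String) : Int := pvAGo text.toList 1

-- ===== PORT B =====
-- walk maximal runs: run length = 1 + length of takeWhile (= inner while j loop);
-- if the run has length ≥ 2 return its start offset, else move past it; exhausted → offset (= n)
def pvBGo : List Char → Nat → Int
  | [], off => (off : Int)
  | c :: rest, off =>
      let run := rest.takeWhile (fun d => d == c)
      if run.length + 1 ≥ 2 then (off : Int)
      else pvBGo rest (off + 1)

def help_fun_different_alt (text : String) : Int := pvBGo text.toList 0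

-- ===== PRECONDITION & SPEC =====
-- On the empty string A returns 1 (its counter starts at 1 and the loop never runs) although zero
-- characters were scanned; B returns 0, the correct count of characters before any adjacent pair.
def D_help_fun_different (text : String) : Prop := text = ""
instance (text : String) : Decidable (D_help_fun_different text) := by unfold D_help_fun_different; infer_instance
def Spec_help_fun_different (text : String) (out : Int) : Prop := ¬ D_help_fun_different text → out = help_fun_different_alt text
instance (text : String) (out : Int) : Decidable (Spec_help_fun_different text out) := by unfold Spec_help_fun_different; infer_instance
def pvDiffWitness_help_fun_different : String := ""
def pvDiffWitnessOut_help_fun_different : Int × Int := (1, 0)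

-- ===== CLAIM (what is proved, stated in full; the proofs are below) =====
def Claim_unchanged_help_fun_different : Prop := ∀ (text : String), Dom_help_fun_different text → Spec_help_fun_different text (help_fun_different text)
def Claim_changed_help_fun_different : Prop := Dom_help_fun_different (pvDiffWitness_help_fun_different) ∧ D_help_fun_different (pvDiffWitness_help_fun_different) ∧ help_fun_different (pvDiffWitness_help_fun_different) = pvDiffWitnessOut_help_fun_different.1 ∧ help_fun_different_alt (pvDiffWitness_help_fun_different) = pvDiffWitnessOut_help_fun_different.2 ∧ pvDiffWitnessOut_help_fun_different.1 ≠ pvDiffWitnessOut_help_fun_different.2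
def Claim_exact_help_fun_different : Prop := ∀ (text : String), Dom_help_fun_different text → D_help_fun_different text → help_fun_different text ≠ help_fun_different_alt text

-- ===== LEMMAS AND PROOFS =====
theorem pvGo_eq (l : List Char) : ∀ off : Nat, l ≠ [] → pvAGo l ((off : Int) + 1) = pvBGo l off := by
  induction l with
  | nil => intro off h; exact absurd rfl h
  | cons c rest ih =>
      intro off _
      cases rest with
      | nil =>
          simp [pvAGo, pvBGo]
      | cons c2 rest2 =>
          by_cases hc : c = c2
          · subst hc
            simp [pvAGo, pvBGo, List.takeWhile]
          · have hne : (c2 == c) = false := by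
              simp; exact fun h => hc h.symm
            have hA : pvAGo (c :: c2 :: rest2) ((off : Int) + 1)
                = pvAGo (c2 :: rest2) ((off : Int) + 1 + 1) := by
              simp [pvAGo, hc]
            have hB : pvBGo (c :: c2 :: rest2) off = pvBGo (c2 :: rest2) (off + 1) := by
              conv_lhs => rw [pvBGo]
              simp [List.takeWhile, hne]
            rw [hA, hB]
            have := ih (off + 1) (by simp)
            push_cast at this ⊢
            exact this

-- ===== VERDICT (by name: the statements are the Claim_ definitions above) =====
theorem help_fun_different_spec : Claim_unchanged_help_fun_different := by
  intro text _ hd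
  unfold help_fun_different help_fun_different_alt
  cases h : text.toList with
  | nil =>
      have ht : text = "" := String.toList_inj.mp (by simp [h])
      exact absurd ht (by simpa [D_help_fun_different] using hd)
  | cons c rest =>
      have := pvGo_eq (c :: rest) 0 (by simp)
      simpa using this

theorem help_fun_different_changed : Claim_changed_help_fun_different := by
  unfold Claim_changed_help_fun_different; decide

theorem help_fun_different_tight : Claim_exact_help_fun_different := by
  intro text _ hd
  unfold D_help_fun_different at hd
  subst hd
  decide
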